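-- pv_equiv track=rewrite | github.com/amar3012005/demo.davinciai | rag-daytona.v2/detective.py | _find_next_empty
-- ===== SOURCE A (Python) =====
-- from typing import List, Dict, Optional, Set
--
-- def _find_next_empty(form_fields: list) -> Optional[dict]:
--     """Find next unfilled required field, or first unfilled field."""
--     for f in form_fields:
--         if f["required"] and not f["filled"]:
--             return f
--     for f in form_fields:
--         if not f["filled"]:
--             return f
--     return None
-- ===== SOURCE B (Python) =====
-- def _find_next_empty(form_fields: list):
--     """Find next unfilled required field, or first unfilled field (single pass)."""
--     fallback = None
--     for f in form_fields:
--         if f["required"] and not f["filled"]: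
--             return f
--         if not f["filled"] and fallback is None:
--             fallback = f
--     return fallback
-- ===== Notes on version B (the rewrite author's own statement) =====
-- stated objective: simpler
-- what changed: Replaces A's two sequential scans (first for required-unfilled, then a fresh scan for any unfilled) by one single pass that returns a required-unfilled field immediately and remembers the first unfilled field as a fallback.
import Mathlib
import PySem

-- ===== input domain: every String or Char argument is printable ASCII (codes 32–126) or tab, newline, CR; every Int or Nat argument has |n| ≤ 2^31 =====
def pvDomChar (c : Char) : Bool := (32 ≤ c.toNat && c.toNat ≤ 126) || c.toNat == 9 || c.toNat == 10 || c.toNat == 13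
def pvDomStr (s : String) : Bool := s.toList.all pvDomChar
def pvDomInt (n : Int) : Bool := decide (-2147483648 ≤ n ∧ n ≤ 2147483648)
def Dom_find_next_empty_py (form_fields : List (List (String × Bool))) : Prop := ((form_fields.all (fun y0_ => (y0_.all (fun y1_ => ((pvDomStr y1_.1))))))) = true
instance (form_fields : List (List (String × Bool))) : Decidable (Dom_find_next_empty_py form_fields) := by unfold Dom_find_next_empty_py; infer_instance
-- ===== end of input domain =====

-- B merges A's two scans into one pass with a fallback variable (objective: simpler).

-- ===== PORT A =====
-- f[k]: first-match lookup in the field dict; exact under Pre_ (both keys present, so no KeyError)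
def pvFGet (f : List (String × Bool)) (k : String) : Bool := (f.lookup k).getD false

-- first loop: 'for f in form_fields: if f["required"] and not f["filled"]: return f'
def pvALoop1 : List (List (String × Bool)) → Option (List (String × Bool))
  | [] => none
  | f :: rest => if pvFGet f "required" && !(pvFGet f "filled") then some f else pvALoop1 rest

-- second loop: 'for f in form_fields: if not f["filled"]: return f'
def pvALoop2 : List (List (String × Bool)) → Option (List (String × Bool))
  | [] => none
  | f :: rest => if !(pvFGet f "filled") then some f else pvALoop2 rest

def find_next_empty_py (form_fields : List (List (String × Bool))) : Option (List (String × Bool)) :=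
  match pvALoop1 form_fields with
  | some f => some f
  | none => pvALoop2 form_fields

-- ===== PORT B =====
-- single pass carrying the fallback (first unfilled field seen so far)
def pvBLoop : List (List (String × Bool)) → Option (List (String × Bool)) → Option (List (String × Bool))
  | [], fb => fb
  | f :: rest, fb =>
    if pvFGet f "required" && !(pvFGet f "filled") then some f
    else if !(pvFGet f "filled") && fb.isNone then pvBLoop rest (some f)
    else pvBLoop rest fb

def find_next_empty_py_alt (form_fields : List (List (String × Bool))) : Option (List (String × Bool)) :=
  pvBLoop form_fields none

-- ===== PRECONDITION & SPEC =====
-- Pre_ admits the inputs on which every field up to (and including) the first well-keyed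
-- required-unfilled field carries both the "required" and "filled" keys: past that point both
-- programs have already returned, so later malformed fields are harmless.  Outside Pre_, Python A
-- raises KeyError on the first malformed field it reaches — except that A can still return via its
-- second scan when an unfilled non-required field precedes a field missing a key; those inputs stay
-- excluded because B (which reads both keys of every field it passes) raises KeyError there (cites).
def pvWellKeyed (f : List (String × Bool)) : Prop :=
  (f.lookup "required").isSome ∧ (f.lookup "filled").isSome

def pvReqUnfilled (f : List (String × Bool)) : Prop :=
  f.lookup "required" = some true ∧ f.lookup "filled" = some false

def Pre_find_next_empty_py (form_fields : List (List (String × Bool))) : Prop :=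
  ∀ j < form_fields.length,
    pvWellKeyed form_fields[j]! ∨ ∃ i < j, pvReqUnfilled form_fields[i]!

instance (form_fields : List (List (String × Bool))) : Decidable (Pre_find_next_empty_py form_fields) := by
  unfold Pre_find_next_empty_py pvWellKeyed pvReqUnfilled; infer_instance

def pvWitness_find_next_empty_py : (List (List (String × Bool))) :=
  [[("required", true), ("filled", true)], [("required", false), ("filled", false)]]

def Spec_find_next_empty_py (form_fields : List (List (String × Bool))) (out : Option (List (String × Bool))) : Prop := out = find_next_empty_py_alt form_fields
instance (form_fields : List (List (String × Bool))) (out : Option (List (String × Bool))) : Decidable (Spec_find_next_empty_py form_fields out) := by unfold Spec_find_next_empty_py; infer_instance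

-- ===== CLAIM (what is proved, stated in full; the proofs are below) =====
def Claim_equal_find_next_empty_py : Prop := ∀ (form_fields : List (List (String × Bool))), Dom_find_next_empty_py form_fields → Pre_find_next_empty_py form_fields → Spec_find_next_empty_py form_fields (find_next_empty_py form_fields)

-- ===== LEMMAS AND PROOFS =====

-- B's single pass returns the first required-unfilled field if any, else the carried fallback,
-- else the first unfilled field.
theorem pvBLoop_eq (l : List (List (String × Bool))) :
    ∀ fb, pvBLoop l fb =
      match pvALoop1 l with
      | some f => some f
      | none => match fb with
                | some g => some g
                | none => pvALoop2 l := by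
  induction l with
  | nil => intro fb; cases fb <;> simp [pvBLoop, pvALoop1, pvALoop2]
  | cons f rest ih =>
    intro fb
    by_cases h1 : (pvFGet f "required" && !(pvFGet f "filled")) = true
    · simp [pvBLoop, pvALoop1, h1]
    · by_cases h2 : (!(pvFGet f "filled")) = true
      · have hreq : pvFGet f "required" = false := by
          cases hv : pvFGet f "required" <;> simp [hv, h2] at h1 ⊢
        cases fb with
        | none =>
          simp [pvBLoop, pvALoop1, pvALoop2, hreq, h2, ih]
        | some g =>
          simp [pvBLoop, pvALoop1, hreq, h2, ih]
      · have hfill : pvFGet f "filled" = true := by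
          cases hv : pvFGet f "filled" <;> simp [hv] at h2 ⊢
        simp [pvBLoop, pvALoop1, pvALoop2, hfill, ih]

-- ===== VERDICT (by name: the statement is the Claim_ definition above) =====
theorem find_next_empty_py_spec : Claim_equal_find_next_empty_py := by
  intro ff _ _
  unfold Spec_find_next_empty_py find_next_empty_py find_next_empty_py_alt
  rw [pvBLoop_eq]
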